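-- pv_equiv track=rewrite | github.com/Raymondrrb/openclaw | tools/top5_ranker.py | _check_brand_diversity
-- ===== SOURCE A (Python) =====
-- def _check_brand_diversity(top5: list[dict]) -> str | None:
--     """Warn if 3+ of 5 products share a brand. Not a hard fail."""
--     from collections import Counter
--     brands = [p.get("brand", "").lower().strip() for p in top5 if p.get("brand")]
--     counts = Counter(brands)
--     for brand, count in counts.most_common(1):
--         if count >= 3:
--             return f"Brand concentration warning: {brand} appears {count}/5 times"
--     return None
-- ===== SOURCE B (Python) =====
-- def _check_brand_diversity(top5: list[dict]) -> str | None: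
--     """Warn if 3+ of 5 products share a brand. Not a hard fail."""
--     brands = [p.get("brand", "").lower().strip() for p in top5 if p.get("brand")]
--     # scan the distinct brands in first-seen order: count the leading brand,
--     # then drop all its occurrences; keep the first brand with the highest
--     # count (no Counter, no hash counting)
--     best = None
--     rest = brands
--     while rest:
--         b = rest[0]
--         c = rest.count(b)
--         if best is None or c > best[1]:
--             best = (b, c)
--         rest = [x for x in rest if x != b]
--     if best and best[1] >= 3:
--         return f"Brand concentration warning: {best[0]} appears {best[1]}/5 times"
--     return None
-- ===== Notes on version B (the rewrite author's own statement) =====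
-- stated objective: alternative
-- what changed: Replaces Counter hash-counting plus most_common(1) with a scan over the distinct brands in first-seen order (count the leading brand with list.count, then filter out all its occurrences) keeping the first brand whose count is strictly higher, which reproduces Counter's first-seen tie-break.
import Mathlib
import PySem

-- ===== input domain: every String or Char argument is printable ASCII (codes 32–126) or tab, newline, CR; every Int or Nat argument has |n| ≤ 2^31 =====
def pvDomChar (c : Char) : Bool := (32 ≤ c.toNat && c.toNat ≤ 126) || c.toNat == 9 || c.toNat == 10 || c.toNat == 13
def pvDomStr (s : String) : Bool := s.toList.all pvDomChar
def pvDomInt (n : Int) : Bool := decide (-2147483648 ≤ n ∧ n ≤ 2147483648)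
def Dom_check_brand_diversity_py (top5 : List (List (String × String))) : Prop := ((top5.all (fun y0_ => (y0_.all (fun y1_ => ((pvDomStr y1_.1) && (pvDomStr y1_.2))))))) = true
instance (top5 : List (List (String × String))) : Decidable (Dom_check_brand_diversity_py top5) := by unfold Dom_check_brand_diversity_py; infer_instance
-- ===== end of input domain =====

-- B replaces Counter + most_common(1) by a recursion over the distinct brands (count head,
-- filter it out, recurse, keep the first-seen maximal count): an alternative of similar cost.


-- the warning f-string (identical in A's and B's Python)
def pvMsg (b : String) (c : Int) : String :=
  "Brand concentration warning: " ++ b ++ " appears " ++ PySem.Int.toStr c ++ "/5 times"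

-- brands = [p.get("brand", "").lower().strip() for p in top5 if p.get("brand")]  (identical line in A's and B's Python)
def pvBrands (top5 : List (List (String × String))) : List String :=
  (top5.filter (fun p => ((PySem.Dict.mk p).get? "brand").any (fun s => s != ""))).map
    (fun p => PySem.Str.strip (PySem.Str.lower ((PySem.Dict.mk p).getD "brand" "")))

-- ===== PORT A =====
-- 'for brand, count in counts.most_common(1): if count >= 3: return …' then 'return None'
def pvMcLoop : List (String × Int) → Option String
  | [] => none
  | (b, c) :: rest => if c ≥ 3 then some (pvMsg b c) else pvMcLoop rest

def check_brand_diversity_py (top5 : List (List (String × String))) : Option String :=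
  let brands := pvBrands top5
  let counts := PySem.Dict.counter brands
  -- counts.most_common(1) = sorted(counts.items(), key=value, reverse=True)[:1]
  pvMcLoop ((PySem.List.sorted counts.items (fun kv => kv.2) true).take 1)

-- ===== PORT B =====
-- the while loop: scan the distinct brands in first-seen order (count the leading brand,
-- drop its occurrences), keeping the first brand with a strictly higher count
def pvBestLoop : Option (String × Int) → List String → Option (String × Int)
  | best, [] => best
  | best, b :: t =>
      let c : Int := ((b :: t).count b : Nat)
      let best' := match best with
        | none => some (b, c)
        | some (pb, pc) => if c > pc then some (b, c) else some (pb, pc)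
      pvBestLoop best' ((b :: t).filter (fun x => x != b))
  termination_by _ bs => bs.length
  decreasing_by
    have h : ((b :: t).filter (fun x => x != b)) = t.filter (fun x => x != b) := by
      simp [List.filter]
    rw [h]
    have := t.length_filter_le (fun x => x != b)
    simp only [List.length_cons]
    omega

def check_brand_diversity_py_alt (top5 : List (List (String × String))) : Option String :=
  let brands := pvBrands top5
  match pvBestLoop none brands with
  | none => none
  | some (b, c) => if c ≥ 3 then some (pvMsg b c) else none

-- ===== PRECONDITION & SPEC =====
-- Pre_ only states that each inner association list stands for a real Python dict as far as
-- this function reads one: the key "brand" occurs at most once. Every input constructible as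
-- a Python dict satisfies it (A is total), so no Python-side input is excluded.
def Pre_check_brand_diversity_py (top5 : List (List (String × String))) : Prop :=
  ∀ p ∈ top5, (p.filter (fun kv => kv.1 == "brand")).length ≤ 1
instance (top5 : List (List (String × String))) : Decidable (Pre_check_brand_diversity_py top5) := by unfold Pre_check_brand_diversity_py; infer_instance

def pvWitness_check_brand_diversity_py : (List (List (String × String))) :=
  [[("brand", "Acme")], [("brand", " acme ")], [("name", "x"), ("brand", "ACME")], [("brand", "")], []]

def Spec_check_brand_diversity_py (top5 : List (List (String × String))) (out : Option String) : Prop := out = check_brand_diversity_py_alt top5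
instance (top5 : List (List (String × String))) (out : Option String) : Decidable (Spec_check_brand_diversity_py top5 out) := by unfold Spec_check_brand_diversity_py; infer_instance

-- ===== CLAIM (what is proved, stated in full; the proofs are below) =====
def Claim_equal_check_brand_diversity_py : Prop := ∀ (top5 : List (List (String × String))), Dom_check_brand_diversity_py top5 → Pre_check_brand_diversity_py top5 → Spec_check_brand_diversity_py top5 (check_brand_diversity_py top5)

-- ===== LEMMAS AND PROOFS =====

-- 'first element with maximal second component' of a list of (brand, count), as a left fold
def pvStep (acc : Option (String × Int)) (kv : String × Int) : Option (String × Int) :=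
  match acc with
  | none => some kv
  | some m => if m.2 < kv.2 then some kv else some m

def pvArgmax (l : List (String × Int)) : Option (String × Int) := l.foldl pvStep none

-- Counter(bs).items() as a pure function of bs (the shape of PySem.Dict.items_counter)
def pvItems (bs : List String) : List (String × Int) :=
  (PySem.Set.ofList bs).map (fun k => (k, (List.count k bs : Int)))

theorem pv_head_insertBy (x : String × Int) (acc : List (String × Int)) :
    (PySem.List.insertBy (fun a b => decide ((fun kv => kv.2) b < (fun kv => kv.2) a)) x acc).head? =
      pvStep acc.head? x := by
  cases acc with
  | nil => simp [PySem.List.insertBy, pvStep]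
  | cons y ys =>
      simp only [PySem.List.insertBy, List.head?_cons, pvStep]
      by_cases h : y.2 < x.2 <;> simp [h]

theorem pv_head_foldl_ins (l : List (String × Int)) (acc : List (String × Int)) :
    (l.foldl (fun acc x => PySem.List.insertBy (fun a b => decide ((fun kv => kv.2) b < (fun kv => kv.2) a)) x acc) acc).head? =
      l.foldl pvStep acc.head? := by
  induction l generalizing acc with
  | nil => rfl
  | cons x xs ih =>
      simp only [List.foldl_cons]
      rw [ih, ← pv_head_insertBy x acc]

theorem pv_head_sorted_rev (l : List (String × Int)) :
    (PySem.List.sorted l (fun kv => kv.2) true).head? = pvArgmax l := by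
  rw [PySem.List.sorted_rev_eq_foldl_insertBy]
  exact pv_head_foldl_ins l []

theorem pv_mcLoop_take_one (l : List (String × Int)) :
    pvMcLoop (l.take 1) =
      (match l.head? with
        | none => none
        | some (b, c) => if c ≥ 3 then some (pvMsg b c) else none) := by
  cases l with
  | nil => rfl
  | cons x xs => cases x with | mk b c => simp [pvMcLoop]

theorem pv_ofList_filter (t : List String) (b : String) :
    PySem.Set.ofList (t.filter (fun x => x != b)) =
      (PySem.Set.ofList t).filter (fun x => x != b) := by
  induction t with
  | nil => rfl
  | cons y ys ih =>
      by_cases hy : y = b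
      · subst hy
        rw [show (y :: ys).filter (fun x => x != y) = ys.filter (fun x => x != y) by simp [List.filter]]
        rw [ih, PySem.Set.ofList_cons]
        simp only [PySem.Set.discard]
        rw [show (y :: (PySem.Set.ofList ys).filter (fun y_1 => !(y_1 == y))).filter (fun x => x != y) =
              ((PySem.Set.ofList ys).filter (fun y_1 => !(y_1 == y))).filter (fun x => x != y) by
            simp [List.filter]]
        rw [List.filter_filter]
        apply List.filter_congr
        intro a _
        cases h : a == y <;> simp [bne, h]
      · have hyb : (y != b) = true := by simp [hy]
        rw [show (y :: ys).filter (fun x => x != b) = y :: ys.filter (fun x => x != b) by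
            simp [List.filter, hyb]]
        rw [PySem.Set.ofList_cons, PySem.Set.ofList_cons, ih]
        rw [show (y :: PySem.Set.discard ((PySem.Set.ofList ys)) y).filter (fun x => x != b) =
              y :: (PySem.Set.discard ((PySem.Set.ofList ys)) y).filter (fun x => x != b) by
            simp [List.filter, hyb]]
        congr 1
        simp only [PySem.Set.discard, List.filter_filter]
        apply List.filter_congr
        intro a _
        exact Bool.and_comm _ _

theorem pv_items_cons (b : String) (t : List String) :
    pvItems (b :: t) =
      (b, (List.count b (b :: t) : Int)) :: pvItems (t.filter (fun x => x != b)) := by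
  simp only [pvItems, PySem.Set.ofList_cons, List.map_cons]
  congr 1
  rw [pv_ofList_filter t b]
  rw [show PySem.Set.discard (PySem.Set.ofList t) b =
        (PySem.Set.ofList t).filter (fun x => x != b) from rfl]
  apply List.map_congr_left
  intro k hk
  have hkb : (k != b) = true := (List.mem_filter.mp hk).2
  have hkb' : k ≠ b := by simpa using hkb
  rw [List.count_cons_of_ne (fun h => hkb' h.symm),
      List.count_filter (p := fun x => x != b) (a := k) hkb]

theorem pv_step_eq (acc : Option (String × Int)) (b : String) (c : Int) :
    (match acc with
      | none => some (b, c)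
      | some (pb, pc) => if c > pc then some (b, c) else some (pb, pc)) =
      pvStep acc (b, c) := by
  cases acc with
  | none => rfl
  | some m => cases m with | mk pb pc => rfl

theorem pv_bestLoop_eq (bs : List String) (acc : Option (String × Int)) :
    pvBestLoop acc bs = (pvItems bs).foldl pvStep acc := by
  have H : ∀ (n : Nat) (bs : List String) (acc : Option (String × Int)),
      bs.length ≤ n → pvBestLoop acc bs = (pvItems bs).foldl pvStep acc := by
    intro n
    induction n with
    | zero =>
        intro bs acc h
        have : bs = [] := List.eq_nil_of_length_eq_zero (Nat.le_zero.mp h)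
        subst this; rw [pvBestLoop.eq_def]; rfl
    | succ n ih =>
        intro bs acc h
        cases bs with
        | nil => rw [pvBestLoop.eq_def]; rfl
        | cons b t =>
            have hfil : ((b :: t).filter (fun x => x != b)) = t.filter (fun x => x != b) := by
              simp [List.filter]
            have hlen : (t.filter (fun x => x != b)).length ≤ n := by
              have := t.length_filter_le (fun x => x != b)
              simp only [List.length_cons] at h
              omega
            rw [pvBestLoop.eq_def]
            simp only [hfil]
            rw [ih _ _ hlen]
            rw [pv_items_cons b t, List.foldl_cons, pv_step_eq]
  exact H bs.length bs acc le_rfl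

-- ===== VERDICT (by name: the statement is the Claim_ definition above) =====
theorem check_brand_diversity_py_spec : Claim_equal_check_brand_diversity_py := by
  intro top5 _ _
  show check_brand_diversity_py top5 = check_brand_diversity_py_alt top5
  show pvMcLoop ((PySem.List.sorted (PySem.Dict.counter (pvBrands top5)).items (fun kv => kv.2) true).take 1) =
    (match pvBestLoop none (pvBrands top5) with
      | none => none
      | some (b, c) => if c ≥ 3 then some (pvMsg b c) else none)
  rw [PySem.Dict.items_counter]
  rw [show (PySem.Set.ofList (pvBrands top5)).map (fun k => (k, (List.count k (pvBrands top5) : Int))) =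
        pvItems (pvBrands top5) from rfl]
  rw [pv_mcLoop_take_one, pv_head_sorted_rev, pv_bestLoop_eq]
  rfl
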